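-- pv_equiv track=rewrite | github.com/sana-saniya/AgentX-Tech-Divas-ps2 | main.py | solve_maze_bfs
-- ===== SOURCE A (Python) =====
-- def solve_maze_bfs(maze, start, goal, rows, cols):
--     """Calculates path for the Hint System"""
--     queue = [(start, [start])]
--     visited = {start}
--     while queue:
--         (r, c), path = queue.pop(0)
--         if (r, c) == goal: return path
--         for dr, dc in [(-1, 0), (1, 0), (0, -1), (0, 1)]:
--             nr, nc = r + dr, c + dc
--             if 0 <= nr < rows and 0 <= nc < cols and maze[nr][nc] == 0 and (nr, nc) not in visited:
--                 visited.add((nr, nc))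
--                 new_path = list(path)
--                 new_path.append((nr, nc))
--                 queue.append(((nr, nc), new_path))
--     return None
-- ===== SOURCE B (Python) =====
-- def solve_maze_bfs(maze, start, goal, rows, cols):
--     """Calculates path for the Hint System"""
--     parent = {}
--     visited = {start}
--     queue = [start]
--     head = 0
--     while head < len(queue):
--         cur = queue[head]
--         head += 1
--         if cur == goal:
--             path = []
--             node = cur
--             while node in parent:
--                 path.append(node)
--                 node = parent[node]
--             path.append(node)
--             path.reverse()
--             return path
--         r, c = cur
--         for dr, dc in ((-1, 0), (1, 0), (0, -1), (0, 1)):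
--             nr, nc = r + dr, c + dc
--             if 0 <= nr < rows and 0 <= nc < cols and maze[nr][nc] == 0 and (nr, nc) not in visited:
--                 visited.add((nr, nc))
--                 parent[(nr, nc)] = cur
--                 queue.append((nr, nc))
--     return None
-- ===== Notes on version B (the rewrite author's own statement) =====
-- stated objective: alternative
-- what changed: A's BFS pops from the front of a plain list and copies the whole path into every queue entry; B keeps a head-index queue of bare cells plus a parent-pointer dict and reconstructs the path once when the goal is popped.
-- outside the precondition, e.g. on solve_maze_bfs([[0, 0], [1, 1]], (0, 0), (9, 9), 5, 2): A returns None, B returns None; on solve_maze_bfs([[0, 0, 1]], (0, 0), (5, 5), 1, 9): A returns None, B returns None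
import Mathlib
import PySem

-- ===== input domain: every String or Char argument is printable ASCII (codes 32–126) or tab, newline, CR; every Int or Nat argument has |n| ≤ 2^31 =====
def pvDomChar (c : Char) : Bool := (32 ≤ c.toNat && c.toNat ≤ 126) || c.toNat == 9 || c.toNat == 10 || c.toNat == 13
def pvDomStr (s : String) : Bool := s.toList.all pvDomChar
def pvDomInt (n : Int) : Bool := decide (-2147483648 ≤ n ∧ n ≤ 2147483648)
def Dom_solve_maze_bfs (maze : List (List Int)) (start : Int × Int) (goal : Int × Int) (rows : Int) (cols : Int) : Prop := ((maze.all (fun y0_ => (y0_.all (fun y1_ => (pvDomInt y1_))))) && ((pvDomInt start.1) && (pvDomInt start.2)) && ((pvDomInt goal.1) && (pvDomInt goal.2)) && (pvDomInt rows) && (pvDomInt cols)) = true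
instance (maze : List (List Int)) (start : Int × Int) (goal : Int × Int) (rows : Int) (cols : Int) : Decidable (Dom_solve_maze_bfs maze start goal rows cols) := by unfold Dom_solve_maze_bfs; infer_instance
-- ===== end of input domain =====

-- B replaces A's BFS over a queue of (cell, full-path-copy) entries popped from the list front by a
-- BFS over a head-indexed queue of bare cells with a parent-pointer dict, reconstructing the path
-- once when the goal is popped (a different algorithm; its speed was not measured by the check).

-- ===== PORT A =====
-- maze[nr][nc]; the default 1 is only read outside Pre_ (where the Python raises IndexError)
def pvCell (maze : List (List Int)) (nr nc : Int) : Int :=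
  PySem.List.pyGetD (PySem.List.pyGetD maze nr []) nc 1

def pvDirs : List (Int × Int) := [(-1, 0), (1, 0), (0, -1), (0, 1)]

-- body of A's inner 'for dr, dc in …' loop
def pvAStep (maze : List (List Int)) (rows cols r c : Int) (path : List (Int × Int))
    (st : List ((Int × Int) × List (Int × Int)) × PySem.Set (Int × Int)) (d : Int × Int) :
    List ((Int × Int) × List (Int × Int)) × PySem.Set (Int × Int) :=
  let nr := r + d.1
  let nc := c + d.2
  if 0 ≤ nr ∧ nr < rows ∧ 0 ≤ nc ∧ nc < cols ∧ pvCell maze nr nc = 0 ∧ ¬ (nr, nc) ∈ st.2 then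
    (st.1 ++ [((nr, nc), path ++ [(nr, nc)])], PySem.Set.add st.2 (nr, nc))
  else st

-- A's 'while queue' loop; fuel rows*cols+1 bounds the iteration count (each iteration pops one
-- entry and every push marks a fresh in-grid cell visited, so ≤ rows*cols+1 pops ever happen)
def solveA_loop (maze : List (List Int)) (goal : Int × Int) (rows cols : Int) :
    Nat → List ((Int × Int) × List (Int × Int)) → PySem.Set (Int × Int) → Option (List (Int × Int))
  | 0, _, _ => none
  | _ + 1, [], _ => none
  | fuel + 1, ((r, c), path) :: rest, visited =>
    if (r, c) = goal then some path
    else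
      let s := pvDirs.foldl (pvAStep maze rows cols r c path) (rest, visited)
      solveA_loop maze goal rows cols fuel s.1 s.2

def solve_maze_bfs (maze : List (List Int)) (start : Int × Int) (goal : Int × Int) (rows : Int) (cols : Int) : Option (List (Int × Int)) :=
  solveA_loop maze goal rows cols (rows.toNat * cols.toNat + 1) [(start, [start])] (PySem.Set.ofList [start])

-- ===== PORT B =====
-- body of B's inner 'for dr, dc in …' loop (state: queue, visited, parent)
def pvBStep (maze : List (List Int)) (rows cols r c : Int)
    (st : List (Int × Int) × PySem.Set (Int × Int) × PySem.Dict (Int × Int) (Int × Int)) (d : Int × Int) :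
    List (Int × Int) × PySem.Set (Int × Int) × PySem.Dict (Int × Int) (Int × Int) :=
  let nr := r + d.1
  let nc := c + d.2
  if 0 ≤ nr ∧ nr < rows ∧ 0 ≤ nc ∧ nc < cols ∧ pvCell maze nr nc = 0 ∧ ¬ (nr, nc) ∈ st.2.1 then
    (st.1 ++ [(nr, nc)], PySem.Set.add st.2.1 (nr, nc), st.2.2.insert (nr, nc) (r, c))
  else st

-- B's 'while node in parent' reconstruction loop; fuel parent.size+1 suffices (parent chains are
-- acyclic and each non-final hop consumes a distinct key, proved via the chain-length invariant)
def pvRecGo (parent : PySem.Dict (Int × Int) (Int × Int)) :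
    Nat → (Int × Int) → List (Int × Int) → List (Int × Int)
  | 0, node, path => path ++ [node]
  | fuel + 1, node, path =>
    match parent.get? node with
    | some u => pvRecGo parent fuel u (path ++ [node])
    | none => path ++ [node]

def pvReconstruct (parent : PySem.Dict (Int × Int) (Int × Int)) (cur : Int × Int) : List (Int × Int) :=
  (pvRecGo parent (parent.size + 1) cur []).reverse

-- B's 'while head < len(queue)' loop; same fuel bound as A's loop
def solveB_loop (maze : List (List Int)) (goal : Int × Int) (rows cols : Int) :
    Nat → List (Int × Int) → Nat → PySem.Set (Int × Int) → PySem.Dict (Int × Int) (Int × Int) → Option (List (Int × Int))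
  | 0, _, _, _, _ => none
  | fuel + 1, queue, head, visited, parent =>
    if head < queue.length then
      let cur := queue.getD head (0, 0)   -- queue[head], in range by the guard
      if cur = goal then some (pvReconstruct parent cur)
      else
        let s := pvDirs.foldl (pvBStep maze rows cols cur.1 cur.2) (queue, visited, parent)
        solveB_loop maze goal rows cols fuel s.1 (head + 1) s.2.1 s.2.2
    else none

def solve_maze_bfs_alt (maze : List (List Int)) (start : Int × Int) (goal : Int × Int) (rows : Int) (cols : Int) : Option (List (Int × Int)) :=
  solveB_loop maze goal rows cols (rows.toNat * cols.toNat + 1) [start] 0 (PySem.Set.ofList [start]) PySem.Dict.empty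

-- ===== PRECONDITION & SPEC =====
-- Pre_ admits inputs whose declared rows/cols do not overstate the actual maze dimensions, plus two
-- trivially safe cases touching no cell beyond the first ring (start = goal; every neighbour of
-- start inside the declared bounds is an existing wall cell): there the search indexes no missing
-- cell; outside Pre_ the search can index a missing cell and A raises IndexError (B raises
-- identically).  Reachability is not closed-form, so Pre_ also excludes some inputs on which the
-- search happens never to reach a missing cell and A returns; see the cites.
def Pre_solve_maze_bfs (maze : List (List Int)) (start : Int × Int) (goal : Int × Int) (rows : Int) (cols : Int) : Prop :=
  start = goal ∨
    (rows.toNat ≤ maze.length ∧ ∀ row ∈ maze, cols.toNat ≤ row.length) ∨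
    (∀ q ∈ [(start.1 - 1, start.2), (start.1 + 1, start.2), (start.1, start.2 - 1), (start.1, start.2 + 1)],
      (0 ≤ q.1 ∧ q.1 < rows ∧ 0 ≤ q.2 ∧ q.2 < cols) →
        q.1.toNat < maze.length ∧ q.2.toNat < (maze.getD q.1.toNat []).length ∧
          (maze.getD q.1.toNat []).getD q.2.toNat 0 ≠ 0)
instance (maze : List (List Int)) (start : Int × Int) (goal : Int × Int) (rows : Int) (cols : Int) : Decidable (Pre_solve_maze_bfs maze start goal rows cols) := by unfold Pre_solve_maze_bfs; infer_instance

def pvWitness_solve_maze_bfs : List (List Int) × (Int × Int) × (Int × Int) × Int × Int :=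
  ([[0, 0], [1, 0]], (0, 0), (1, 1), 2, 2)

def Spec_solve_maze_bfs (maze : List (List Int)) (start : Int × Int) (goal : Int × Int) (rows : Int) (cols : Int) (out : Option (List (Int × Int))) : Prop := out = solve_maze_bfs_alt maze start goal rows cols
instance (maze : List (List Int)) (start : Int × Int) (goal : Int × Int) (rows : Int) (cols : Int) (out : Option (List (Int × Int))) : Decidable (Spec_solve_maze_bfs maze start goal rows cols out) := by unfold Spec_solve_maze_bfs; infer_instance

-- ===== CLAIM (what is proved, stated in full; the proofs are below) =====
def Claim_equal_solve_maze_bfs : Prop := ∀ (maze : List (List Int)) (start : Int × Int) (goal : Int × Int) (rows : Int) (cols : Int), Dom_solve_maze_bfs maze start goal rows cols → Pre_solve_maze_bfs maze start goal rows cols → Spec_solve_maze_bfs maze start goal rows cols (solve_maze_bfs maze start goal rows cols)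

-- ===== LEMMAS AND PROOFS =====

-- p is the parent-chain path ending at v: p = [start, …, v] with parent links between consecutive nodes
inductive pvChain (parent : PySem.Dict (Int × Int) (Int × Int)) : (Int × Int) → List (Int × Int) → Prop
  | nil (v : Int × Int) : parent.get? v = none → pvChain parent v [v]
  | cons (v u : Int × Int) (p : List (Int × Int)) :
      parent.get? v = some u → pvChain parent u p → pvChain parent v (p ++ [v])

def pvEntryOK (vis : PySem.Set (Int × Int)) (parent : PySem.Dict (Int × Int) (Int × Int))
    (e : (Int × Int) × List (Int × Int)) : Prop :=
  pvChain parent e.1 e.2 ∧ (∀ x ∈ e.2, x ∈ vis) ∧ e.2.length ≤ parent.size + 1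

def pvKeysOK (parent : PySem.Dict (Int × Int) (Int × Int)) (vis : PySem.Set (Int × Int)) : Prop :=
  ∀ k ∈ parent.keys, k ∈ vis

-- the simulation relation between A's loop state and B's loop state
def pvRel (qA : List ((Int × Int) × List (Int × Int))) (vis : PySem.Set (Int × Int))
    (qB : List (Int × Int)) (head : Nat) (parent : PySem.Dict (Int × Int) (Int × Int)) : Prop :=
  qB.drop head = qA.map Prod.fst ∧ head ≤ qB.length ∧
  (∀ e ∈ qA, pvEntryOK vis parent e) ∧ pvKeysOK parent vis

theorem pvChain_length_pos {parent : PySem.Dict (Int × Int) (Int × Int)} {v : Int × Int}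
    {p : List (Int × Int)} (h : pvChain parent v p) : 1 ≤ p.length := by
  cases h <;> simp

theorem pvRecGo_spec {parent : PySem.Dict (Int × Int) (Int × Int)} {v : Int × Int}
    {p : List (Int × Int)} (h : pvChain parent v p) :
    ∀ (fuel : Nat) (acc : List (Int × Int)), p.length ≤ fuel + 1 →
      pvRecGo parent fuel v acc = acc ++ p.reverse := by
  induction h with
  | nil v hv =>
    intro fuel acc _
    cases fuel with
    | zero => simp [pvRecGo]
    | succ f => simp [pvRecGo, hv]
  | cons v u p hv hc ih =>
    intro fuel acc hlen
    have hp1 : 1 ≤ p.length := pvChain_length_pos hc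
    cases fuel with
    | zero =>
      exfalso
      have h2 : (p ++ [v]).length = p.length + 1 := by simp
      omega
    | succ f =>
      have : pvRecGo parent (f + 1) v acc = pvRecGo parent f u (acc ++ [v]) := by
        simp [pvRecGo, hv]
      rw [this, ih f (acc ++ [v]) (by simp at hlen; omega)]
      simp

theorem pvReconstruct_spec {parent : PySem.Dict (Int × Int) (Int × Int)} {v : Int × Int}
    {p : List (Int × Int)} (h : pvChain parent v p) (hlen : p.length ≤ parent.size + 1) :
    pvReconstruct parent v = p := by
  unfold pvReconstruct
  rw [pvRecGo_spec h (parent.size + 1) [] (by omega)]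
  simp

-- inserting a key not occurring in p leaves the chain intact
theorem pvChain_insert {parent : PySem.Dict (Int × Int) (Int × Int)} {v : Int × Int}
    {p : List (Int × Int)} (h : pvChain parent v p) (n u : Int × Int) :
    n ∉ p → pvChain (parent.insert n u) v p := by
  induction h with
  | nil w hw =>
    intro hn
    have hwn : w ≠ n := fun e => hn (by simp [e])
    exact pvChain.nil w (by rw [PySem.Dict.get?_insert]; simp [hwn, hw])
  | cons w x q hw hc ih =>
    intro hn
    have hwn : w ≠ n := fun e => hn (by simp [e])
    exact pvChain.cons w x q (by rw [PySem.Dict.get?_insert]; simp [hwn, hw])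
      (ih (fun hm => hn (by simp [hm])))

-- one direction step preserves the simulation relation together with the popped entry's invariant
theorem pvStep_rel (maze : List (List Int)) (rows cols r c : Int) (path : List (Int × Int))
    (qA : List ((Int × Int) × List (Int × Int))) (vis : PySem.Set (Int × Int))
    (qB : List (Int × Int)) (head : Nat) (parent : PySem.Dict (Int × Int) (Int × Int))
    (d : Int × Int)
    (hrel : pvRel qA vis qB head parent)
    (hpath : pvEntryOK vis parent ((r, c), path)) :
    pvRel (pvAStep maze rows cols r c path (qA, vis) d).1 (pvAStep maze rows cols r c path (qA, vis) d).2
      (pvBStep maze rows cols r c (qB, vis, parent) d).1 head (pvBStep maze rows cols r c (qB, vis, parent) d).2.2 ∧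
    (pvBStep maze rows cols r c (qB, vis, parent) d).2.1 = (pvAStep maze rows cols r c path (qA, vis) d).2 ∧
    pvEntryOK (pvAStep maze rows cols r c path (qA, vis) d).2 (pvBStep maze rows cols r c (qB, vis, parent) d).2.2 ((r, c), path) := by
  obtain ⟨hq, hh, hent, hkeys⟩ := hrel
  obtain ⟨hchain, hmem, hlen⟩ := hpath
  have hlen' : path.length ≤ parent.size + 1 := hlen
  by_cases hcond : 0 ≤ r + d.1 ∧ r + d.1 < rows ∧ 0 ≤ c + d.2 ∧ c + d.2 < cols ∧
      pvCell maze (r + d.1) (c + d.2) = 0 ∧ ¬ (r + d.1, c + d.2) ∈ vis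
  · have hA : pvAStep maze rows cols r c path (qA, vis) d
        = (qA ++ [((r + d.1, c + d.2), path ++ [(r + d.1, c + d.2)])],
           PySem.Set.add vis (r + d.1, c + d.2)) := by
      simp [pvAStep, hcond]
    have hB : pvBStep maze rows cols r c (qB, vis, parent) d
        = (qB ++ [(r + d.1, c + d.2)], PySem.Set.add vis (r + d.1, c + d.2),
           parent.insert (r + d.1, c + d.2) (r, c)) := by
      simp [pvBStep, hcond]
    rw [hA, hB]
    set n : Int × Int := (r + d.1, c + d.2) with hn
    have hnvis : n ∉ vis := hcond.2.2.2.2.2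
    have hnkey : parent.get? n = none := by
      rw [PySem.Dict.get?_eq_none_iff_not_mem_keys]
      exact fun hk => hnvis (hkeys n hk)
    have hnc : parent.contains n = false := by
      rw [PySem.Dict.contains_eq_isSome_get?, hnkey]; rfl
    have hsize : (parent.insert n (r, c)).size = parent.size + 1 := by
      simp only [PySem.Dict.size, PySem.Dict.items_insert_of_not_contains _ _ hnc]
      simp
    have hchain' : pvChain (parent.insert n (r, c)) (r, c) path :=
      pvChain_insert hchain n (r, c) (fun hm => hnvis (hmem n hm))
    refine ⟨⟨?_, ?_, ?_, ?_⟩, rfl, ?_⟩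
    · simp only [List.map_append, List.map_cons, List.map_nil]
      rw [List.drop_append_of_le_length hh, hq]
    · simp; omega
    · intro e he
      simp only [List.mem_append, List.mem_singleton] at he
      rcases he with he | he
      · obtain ⟨ec, em, el⟩ := hent e he
        exact ⟨pvChain_insert ec n (r, c) (fun hm => hnvis (em n hm)),
          fun x hx => by rw [PySem.Set.mem_add]; exact Or.inl (em x hx),
          by show e.2.length ≤ (parent.insert n (r, c)).size + 1; omega⟩
      · subst he
        refine ⟨pvChain.cons n (r, c) path (PySem.Dict.get?_insert_self ..) hchain', ?_, ?_⟩
        · intro x hx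
          rw [PySem.Set.mem_add]
          simp only [List.mem_append, List.mem_singleton] at hx
          rcases hx with hx | hx
          · exact Or.inl (hmem x hx)
          · exact Or.inr hx
        · show (path ++ [n]).length ≤ (parent.insert n (r, c)).size + 1
          simp only [List.length_append, List.length_cons, List.length_nil]
          omega
    · intro k hk
      rw [PySem.Set.mem_add]
      rcases (PySem.Dict.mem_keys_insert parent n k (r, c)).1 hk with hk | hk
      · exact Or.inr hk
      · exact Or.inl (hkeys k hk)
    · exact ⟨hchain', fun x hx => by rw [PySem.Set.mem_add]; exact Or.inl (hmem x hx),
        by show path.length ≤ (parent.insert n (r, c)).size + 1; omega⟩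
  · have hA : pvAStep maze rows cols r c path (qA, vis) d = (qA, vis) := by
      simp only [pvAStep]
      rw [if_neg]
      intro hc
      exact hcond hc
    have hB : pvBStep maze rows cols r c (qB, vis, parent) d = (qB, vis, parent) := by
      simp only [pvBStep]
      rw [if_neg]
      intro hc
      exact hcond hc
    rw [hA, hB]
    exact ⟨⟨hq, hh, hent, hkeys⟩, rfl, ⟨hchain, hmem, hlen⟩⟩

-- the whole inner for-loop preserves the relation
theorem pvFold_rel (maze : List (List Int)) (rows cols r c : Int) (path : List (Int × Int)) :
    ∀ (ds : List (Int × Int)) (qA : List ((Int × Int) × List (Int × Int)))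
      (vis : PySem.Set (Int × Int)) (qB : List (Int × Int)) (head : Nat)
      (parent : PySem.Dict (Int × Int) (Int × Int)),
      pvRel qA vis qB head parent → pvEntryOK vis parent ((r, c), path) →
      pvRel (ds.foldl (pvAStep maze rows cols r c path) (qA, vis)).1
            (ds.foldl (pvAStep maze rows cols r c path) (qA, vis)).2
            (ds.foldl (pvBStep maze rows cols r c) (qB, vis, parent)).1 head
            (ds.foldl (pvBStep maze rows cols r c) (qB, vis, parent)).2.2 ∧
      (ds.foldl (pvBStep maze rows cols r c) (qB, vis, parent)).2.1 =
        (ds.foldl (pvAStep maze rows cols r c path) (qA, vis)).2 := by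
  intro ds
  induction ds with
  | nil => intro qA vis qB head parent hrel hpath; exact ⟨hrel, rfl⟩
  | cons d ds ih =>
    intro qA vis qB head parent hrel hpath
    obtain ⟨hrel', hvis', hpath'⟩ := pvStep_rel maze rows cols r c path qA vis qB head parent d hrel hpath
    simp only [List.foldl_cons]
    have hre : pvBStep maze rows cols r c (qB, vis, parent) d
        = ((pvBStep maze rows cols r c (qB, vis, parent) d).1,
           (pvAStep maze rows cols r c path (qA, vis) d).2,
           (pvBStep maze rows cols r c (qB, vis, parent) d).2.2) := by
      rw [← hvis']
    have hra : pvAStep maze rows cols r c path (qA, vis) d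
        = ((pvAStep maze rows cols r c path (qA, vis) d).1,
           (pvAStep maze rows cols r c path (qA, vis) d).2) := rfl
    rw [hre, hra]
    exact ih _ _ _ _ _ hrel' hpath'

theorem pv_loop_eq (maze : List (List Int)) (goal : Int × Int) (rows cols : Int) :
    ∀ (fuel : Nat) (qA : List ((Int × Int) × List (Int × Int))) (vis : PySem.Set (Int × Int))
      (qB : List (Int × Int)) (head : Nat) (parent : PySem.Dict (Int × Int) (Int × Int)),
      pvRel qA vis qB head parent →
      solveA_loop maze goal rows cols fuel qA vis = solveB_loop maze goal rows cols fuel qB head vis parent := by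
  intro fuel
  induction fuel with
  | zero => intro qA vis qB head parent _; rfl
  | succ f ih =>
    intro qA vis qB head parent hrel
    obtain ⟨hq, hh, hent, hkeys⟩ := hrel
    cases qA with
    | nil =>
      have : ¬ head < qB.length := by
        have := hq; simp at this
        omega
      simp [solveA_loop, solveB_loop, this]
    | cons e rest =>
      obtain ⟨⟨r, c⟩, path⟩ := e
      have hlt : head < qB.length := by
        by_contra hge
        rw [List.drop_eq_nil_of_le (by omega)] at hq
        simp at hq
      have hget : qB.getD head (0, 0) = (r, c) := by
        have h0 : qB[head]? = some (r, c) := by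
          have h1 : (qB.drop head)[0]? = some (r, c) := by rw [hq]; rfl
          rw [List.getElem?_drop] at h1
          simpa using h1
        simp [List.getD, h0]
      have hpath : pvEntryOK vis parent ((r, c), path) := hent _ (by simp)
      by_cases hgoal : (r, c) = goal
      · have hrec : pvReconstruct parent (r, c) = path :=
          pvReconstruct_spec hpath.1 hpath.2.2
        simp only [solveA_loop, solveB_loop]
        rw [if_pos hgoal, if_pos hlt, hget, if_pos hgoal, hrec]
      · have htail : qB.drop (head + 1) = rest.map Prod.fst := by
          have h1 : qB.drop (head + 1) = (qB.drop head).tail := by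
            rw [List.tail_drop]
          rw [h1, hq]
          rfl
        have hrel' : pvRel rest vis qB (head + 1) parent :=
          ⟨htail, by omega, fun e he => hent e (by simp [he]), hkeys⟩
        obtain ⟨hfold, hvis⟩ := pvFold_rel maze rows cols r c path pvDirs rest vis qB (head + 1) parent hrel' hpath
        simp only [solveA_loop, solveB_loop]
        rw [if_neg hgoal, if_pos hlt, hget, if_neg hgoal, hvis]
        exact ih _ _ _ _ _ hfold

-- ===== VERDICT (by name: the statement is the Claim_ definition above) =====
theorem solve_maze_bfs_spec : Claim_equal_solve_maze_bfs := by
  intro maze start goal rows cols _ _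
  unfold Spec_solve_maze_bfs solve_maze_bfs solve_maze_bfs_alt
  apply pv_loop_eq
  refine ⟨rfl, by simp, ?_, ?_⟩
  · intro e he
    simp only [List.mem_singleton] at he
    subst he
    exact ⟨pvChain.nil start (PySem.Dict.get?_empty _), by simp [PySem.Set.ofList], by simp⟩
  · intro k hk
    simp [PySem.Dict.keys_empty] at hk
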